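-- pv_equiv track=rewrite | github.com/pml0607/A-C-remote-by-GA | pyIR.py | getIntegerCode
-- ===== SOURCE A (Python) =====
-- def getIntegerCode(rawDATA):
--     binary = 1 # Decoded binary command
--
--     # Covers data to binary
--     for (typ, tme) in rawDATA:
--         if typ == 1: # Ignore the LOW periods, these should be consitant and thus irrelevant
--             if tme > 1000: # According to NEC protocol a gap of 1687.5 microseconds represents a logical 1 so over 1000 should make a big enough distinction
--                 binary = binary * 10 + 1
--             else:
--                 binary *= 10
--
--     if len(str(binary)) > 34: # Sometimes the binary has two rouge characters on the end
--         binary = int(str(binary)[:34])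
--
--     return int(str(binary),2)
-- ===== SOURCE B (Python) =====
-- def getIntegerCode(rawDATA):
--     # Only the HIGH-pulse durations matter, and at most the first 33 of them
--     # (A's 34-character decimal truncation = start bit + 33 data bits).
--     highs = [tme for typ, tme in rawDATA if typ == 1][:33]
--     # Decode back-to-front: each pulse contributes a positional power-of-two weight.
--     value = 0
--     weight = 1
--     for tme in reversed(highs):
--         if tme > 1000:
--             value += weight
--         weight *= 2
--     return value + weight  # the final weight is the leading start bit's contribution
-- ===== Notes on version B (the rewrite author's own statement) =====
-- stated objective: faster
-- what changed: A decodes MSB-first into a growing decimal big integer and fixes overlong codes by truncating its str() to 34 characters and re-parsing in base 2; B first slices the HIGH-pulse durations down to the 33 that can matter, then decodes them back-to-front with a doubling positional weight (value += weight), adding the start-bit weight at the end - no shift accumulator, no decimal big integer, no string round-trips.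
import Mathlib
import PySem

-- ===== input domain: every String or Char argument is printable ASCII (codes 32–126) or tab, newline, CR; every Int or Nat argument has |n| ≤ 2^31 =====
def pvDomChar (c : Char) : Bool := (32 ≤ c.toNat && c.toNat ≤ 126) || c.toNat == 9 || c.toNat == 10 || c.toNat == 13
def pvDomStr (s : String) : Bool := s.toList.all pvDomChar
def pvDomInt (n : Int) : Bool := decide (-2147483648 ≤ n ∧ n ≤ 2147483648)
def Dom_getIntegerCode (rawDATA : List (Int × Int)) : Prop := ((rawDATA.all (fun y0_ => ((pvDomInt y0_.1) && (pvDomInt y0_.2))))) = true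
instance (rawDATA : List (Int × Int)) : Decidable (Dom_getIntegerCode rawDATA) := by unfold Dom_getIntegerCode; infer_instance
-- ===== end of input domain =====

-- B replaces A's MSB-first decimal accumulator (and its string-truncate/re-parse ending) by a
-- slice of the first 33 HIGH durations decoded back-to-front with a doubling positional weight;
-- objective: faster (A's decimal accumulator grows one digit per HIGH pulse; a timing run
-- could not measure the difference on its generated inputs).


-- ===== PORT A =====
-- Hand port of Python's int(cs) / int(cs, 2). In A the argument is always str(binary), a
-- nonempty string of decimal digit characters (no sign, whitespace or '_'), and on such
-- strings Python's int(s, base) is exactly this left fold over the digit values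
-- (PySem.Int.digitVal? is the per-character digit value); exact on that domain.
def pvIntOfDigits (base : Int) (cs : List Char) : Int :=
  cs.foldl (fun a c => a * base + (((PySem.Int.digitVal? c).getD 0 : Nat) : Int)) 0

def getIntegerCode (rawDATA : List (Int × Int)) : Int :=
  -- binary = 1; for (typ, tme) in rawDATA: if typ == 1: binary = binary*10+1 / binary*10
  let binary : Int := rawDATA.foldl
    (fun binary td =>
      if td.1 == 1 then
        if td.2 > 1000 then binary * 10 + 1 else binary * 10
      else binary) 1
  -- if len(str(binary)) > 34: binary = int(str(binary)[:34])
  let binary : Int :=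
    if PySem.List.len (PySem.Int.toChars binary) > 34 then
      pvIntOfDigits 10 (PySem.List.slice (PySem.Int.toChars binary) none (some 34))
    else binary
  -- return int(str(binary), 2)
  pvIntOfDigits 2 (PySem.Int.toChars binary)

-- ===== PORT B =====
def getIntegerCode_alt (rawDATA : List (Int × Int)) : Int :=
  -- highs = [tme for typ, tme in rawDATA if typ == 1][:33]
  let highs : List Int :=
    PySem.List.slice ((rawDATA.filter (fun td => td.1 == 1)).map (fun td => td.2)) none (some 33)
  -- value = 0; weight = 1; for tme in reversed(highs): if tme > 1000: value += weight; weight *= 2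
  let vw : Int × Int := highs.reverse.foldl
    (fun vw t => (if t > 1000 then vw.1 + vw.2 else vw.1, vw.2 * 2)) ((0 : Int), (1 : Int))
  -- return value + weight
  vw.1 + vw.2

-- ===== PRECONDITION & SPEC =====
def Spec_getIntegerCode (rawDATA : List (Int × Int)) (out : Int) : Prop := out = getIntegerCode_alt rawDATA
instance (rawDATA : List (Int × Int)) (out : Int) : Decidable (Spec_getIntegerCode rawDATA out) := by unfold Spec_getIntegerCode; infer_instance

-- ===== CLAIM (what is proved, stated in full; the proofs are below) =====
def Claim_equal_getIntegerCode : Prop := ∀ (rawDATA : List (Int × Int)), Dom_getIntegerCode rawDATA → Spec_getIntegerCode rawDATA (getIntegerCode rawDATA)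

-- ===== LEMMAS AND PROOFS =====

-- The bit decoded from each HIGH pulse, as a Nat list (proof-only reference sequence).
def pvPulses : List (Int × Int) → List Nat
  | [] => []
  | td :: r => if td.1 == 1 then (if td.2 > 1000 then 1 else 0) :: pvPulses r else pvPulses r

def pvBitN (t : Int) : Nat := if t > 1000 then 1 else 0

def pvDec (bs : List Nat) : Nat := bs.foldl (fun a d => a * 10 + d) 0
def pvBits01 (bs : List Nat) : Prop := ∀ b ∈ bs, b = 0 ∨ b = 1

theorem pvPulses_bits01 (l : List (Int × Int)) : pvBits01 (pvPulses l) := by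
  induction l with
  | nil => intro b hb; simp [pvPulses] at hb
  | cons td r ih =>
    intro b hb
    simp only [pvPulses] at hb
    split at hb
    · rcases List.mem_cons.1 hb with rfl | hb
      · split <;> simp
      · exact ih b hb
    · exact ih b hb

-- pvPulses is the bit image of the HIGH-duration list.
theorem pvPulses_eq (l : List (Int × Int)) :
    pvPulses l = ((l.filter (fun td => td.1 == 1)).map (fun td => td.2)).map pvBitN := by
  induction l with
  | nil => simp [pvPulses]
  | cons td r ih =>
    by_cases h : (td.1 == 1) = true
    · simp [pvPulses, h, ih, pvBitN]
    · simp [pvPulses, h, ih]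

theorem pvDec_append (bs : List Nat) (d : Nat) : pvDec (bs ++ [d]) = pvDec bs * 10 + d := by
  simp [pvDec, List.foldl_append]

theorem pvDec_foldl_le (r : List Nat) : ∀ a : Nat, a ≤ r.foldl (fun x d => x * 10 + d) a := by
  induction r with
  | nil => intro a; simp
  | cons d r ih =>
    intro a
    calc a ≤ a * 10 + d := by omega
    _ ≤ r.foldl (fun x d => x * 10 + d) (a * 10 + d) := ih _

theorem pvDec_one_cons_pos (r : List Nat) : 0 < pvDec (1 :: r) := by
  have h := pvDec_foldl_le r 1
  simpa [pvDec] using h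

-- A's accumulator loop equals the decimal value of the bit list it has written so far.
theorem pvFoldA_eq (l : List (Int × Int)) : ∀ bs : List Nat,
    l.foldl (fun binary td =>
      if td.1 == 1 then
        if td.2 > 1000 then binary * 10 + 1 else binary * 10
      else binary) ((pvDec bs : Nat) : Int)
    = ((pvDec (bs ++ pvPulses l) : Nat) : Int) := by
  induction l with
  | nil => intro bs; simp [pvPulses]
  | cons td r ih =>
    intro bs
    rw [List.foldl_cons]
    simp only [pvPulses]
    by_cases h1 : (td.1 == 1) = true
    · by_cases h2 : td.2 > 1000
      · have e : ((pvDec bs : Nat) : Int) * 10 + 1 = ((pvDec (bs ++ [1]) : Nat) : Int) := by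
          rw [pvDec_append]; push_cast; ring
        rw [if_pos h1, if_pos h2, if_pos h1, if_pos h2, e, ih (bs ++ [1]),
          List.append_assoc]
        rfl
      · have e : ((pvDec bs : Nat) : Int) * 10 = ((pvDec (bs ++ [0]) : Nat) : Int) := by
          rw [pvDec_append]; push_cast; ring
        rw [if_pos h1, if_neg h2, if_pos h1, if_neg h2, e, ih (bs ++ [0]),
          List.append_assoc]
        rfl
    · rw [if_neg h1, if_neg h1, ih bs]

-- `Nat.toDigitsCore` pushes its accumulator to the right …
theorem pvCore_shift (f : Nat) : ∀ (n : Nat) (acc : List Char),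
    Nat.toDigitsCore 10 f n acc = Nat.toDigitsCore 10 f n [] ++ acc := by
  induction f with
  | zero => intro n acc; simp [Nat.toDigitsCore]
  | succ f ih =>
    intro n acc
    simp only [Nat.toDigitsCore]
    by_cases h : n / 10 = 0
    · simp [h]
    · simp only [if_neg h]
      rw [ih (n / 10) [(n % 10).digitChar], ih (n / 10) ((n % 10).digitChar :: acc),
        List.append_assoc]
      rfl

-- … and is fuel-independent once the fuel exceeds the number.
theorem pvCore_fuel (f : Nat) : ∀ (f' n : Nat), n < f → n < f' →
    Nat.toDigitsCore 10 f n [] = Nat.toDigitsCore 10 f' n [] := by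
  induction f with
  | zero => intro f' n h; omega
  | succ f ih =>
    intro f' n hf hf'
    cases f' with
    | zero => omega
    | succ f' =>
      simp only [Nat.toDigitsCore]
      by_cases h : n / 10 = 0
      · simp [h]
      · have hn : 0 < n := by
          rcases Nat.eq_zero_or_pos n with rfl | hn
          · simp at h
          · exact hn
        have hlt : n / 10 < n := Nat.div_lt_self hn (by norm_num)
        simp only [if_neg h]
        rw [pvCore_shift f (n / 10), pvCore_shift f' (n / 10),
          ih f' (n / 10) (by omega) (by omega)]

-- str(n*10 + d) = str(n) ++ [digit d]
theorem pvToDigits_step (n d : Nat) (hn : 0 < n) (hd : d < 10) :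
    Nat.toDigits 10 (n * 10 + d) = Nat.toDigits 10 n ++ [Nat.digitChar d] := by
  unfold Nat.toDigits
  have hdiv : (n * 10 + d) / 10 = n := by omega
  have hmod : (n * 10 + d) % 10 = d := by omega
  conv_lhs => rw [Nat.toDigitsCore]
  simp only [hdiv, hmod]
  rw [if_neg (show ¬ n = 0 by omega), pvCore_shift _ n [d.digitChar],
    pvCore_fuel (n * 10 + d) (n + 1) n (by omega) (by omega)]

-- The decimal representation of A's accumulator is exactly the bit list.
theorem pvToDigits_dec (r : List Nat) (h : pvBits01 r) :
    Nat.toDigits 10 (pvDec (1 :: r)) = '1' :: r.map Nat.digitChar := by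
  induction r using List.reverseRecOn with
  | nil => decide
  | append_singleton r d ih =>
    have hr : pvBits01 r := fun b hb => h b (List.mem_append_left _ hb)
    have hd : d = 0 ∨ d = 1 := h d (List.mem_append_right _ (by simp))
    have e : pvDec (1 :: (r ++ [d])) = pvDec (1 :: r) * 10 + d := by
      have : (1 :: (r ++ [d])) = (1 :: r) ++ [d] := by simp
      rw [this, pvDec_append]
    rw [e, pvToDigits_step _ d (pvDec_one_cons_pos r) (by omega), ih hr]
    simp

-- The hand-ported int(s, base) on a digit string is the base-`b` fold of the digit values.
theorem pvParse_map (b : Nat) (bs : List Nat) (h : pvBits01 bs) : ∀ a : Nat,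
    (bs.map Nat.digitChar).foldl
      (fun x c => x * ((b : Nat) : Int) + (((PySem.Int.digitVal? c).getD 0 : Nat) : Int)) ((a : Nat) : Int)
    = ((bs.foldl (fun x d => x * b + d) a : Nat) : Int) := by
  induction bs with
  | nil => intro a; simp
  | cons d r ih =>
    intro a
    have hd : d = 0 ∨ d = 1 := h d (by simp)
    have hr : pvBits01 r := fun x hx => h x (List.mem_cons_of_mem _ hx)
    have hv : ((PySem.Int.digitVal? d.digitChar).getD 0 : Nat) = d := by
      rcases hd with rfl | rfl <;> decide
    simp only [List.map_cons, List.foldl_cons, hv]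
    have e : ((a : Nat) : Int) * ((b : Nat) : Int) + ((d : Nat) : Int) = ((a * b + d : Nat) : Int) := by
      push_cast; ring
    rw [e, ih hr (a * b + d)]

theorem pvDigitChar_one : Nat.digitChar 1 = '1' := by decide

theorem pvToChars_natCast (m : Nat) : PySem.Int.toChars ((m : Nat) : Int) = Nat.toDigits 10 m := by
  simp [PySem.Int.toChars]

theorem pvBits01_take (bs : List Nat) (n : Nat) (h : pvBits01 bs) : pvBits01 (bs.take n) :=
  fun b hb => h b (List.mem_of_mem_take hb)

-- The MSB-first binary fold over the durations, as an Int (reference form of A's base-2 value).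
-- It equals B's reverse loop: value + a * weight.
theorem pvRevLoop (ts : List Int) : ∀ a : Int,
    ts.foldl (fun v t => v * 2 + (if t > 1000 then 1 else 0)) a
    = (ts.reverse.foldl (fun vw t => (if t > 1000 then vw.1 + vw.2 else vw.1, vw.2 * 2))
        ((0 : Int), (1 : Int))).1
      + a * (ts.reverse.foldl (fun vw t => (if t > 1000 then vw.1 + vw.2 else vw.1, vw.2 * 2))
        ((0 : Int), (1 : Int))).2 := by
  induction ts with
  | nil => intro a; simp
  | cons t ts ih =>
    intro a
    rw [List.foldl_cons, ih (a * 2 + (if t > 1000 then 1 else 0))]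
    simp only [List.reverse_cons, List.foldl_append, List.foldl_cons, List.foldl_nil]
    by_cases h : t > 1000 <;> simp only [h, if_pos, if_false] <;> ring

-- Cast bridge: the Int binary fold over durations is the Nat binary fold over their bits.
theorem pvCastFoldT (ts : List Int) : ∀ a : Nat,
    ts.foldl (fun v t => v * 2 + (if t > 1000 then 1 else 0)) ((a : Nat) : Int)
    = (((ts.map pvBitN).foldl (fun v b => v * 2 + b) a : Nat) : Int) := by
  induction ts with
  | nil => intro a; simp
  | cons t ts ih =>
    intro a
    simp only [List.foldl_cons, List.map_cons]
    have e : ((a : Nat) : Int) * 2 + (if t > 1000 then (1 : Int) else 0)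
        = ((a * 2 + pvBitN t : Nat) : Int) := by
      unfold pvBitN; by_cases h : t > 1000 <;> simp [h]
    rw [e, ih (a * 2 + pvBitN t)]

-- ===== VERDICT (by name: the statement is the Claim_ definition above) =====
theorem getIntegerCode_spec : Claim_equal_getIntegerCode := by
  intro rawDATA _
  unfold Spec_getIntegerCode getIntegerCode getIntegerCode_alt
  set ts := (rawDATA.filter (fun td => td.1 == 1)).map (fun td => td.2) with hts
  set p := pvPulses rawDATA with hp
  have hpt : p = ts.map pvBitN := by rw [hp, hts, pvPulses_eq]
  have hbits : pvBits01 p := pvPulses_bits01 rawDATA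
  -- A's loop result
  have hA0 : rawDATA.foldl
      (fun binary td =>
        if td.1 == 1 then
          if td.2 > 1000 then binary * 10 + 1 else binary * 10
        else binary) 1
      = ((pvDec (1 :: p) : Nat) : Int) := by
    have h := pvFoldA_eq rawDATA [1]
    have e : ((pvDec [1] : Nat) : Int) = 1 := by decide
    rw [e] at h
    simpa using h
  have hchars : PySem.Int.toChars ((pvDec (1 :: p) : Nat) : Int)
      = (1 :: p).map Nat.digitChar := by
    rw [pvToChars_natCast, pvToDigits_dec p hbits]
    simp [pvDigitChar_one]
  -- A's final value is the Nat binary fold over 1 :: p.take 33 in every case.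
  have hAres : (let binary : Int :=
      if PySem.List.len (PySem.Int.toChars ((pvDec (1 :: p) : Nat) : Int)) > 34 then
        pvIntOfDigits 10 (PySem.List.slice (PySem.Int.toChars ((pvDec (1 :: p) : Nat) : Int)) none (some 34))
      else ((pvDec (1 :: p) : Nat) : Int)
      pvIntOfDigits 2 (PySem.Int.toChars binary))
      = (((p.take 33).foldl (fun v b => v * 2 + b) 1 : Nat) : Int) := by
    have hlen : PySem.List.len ((1 :: p).map Nat.digitChar) = ((1 + p.length : Nat) : Int) := by
      simp [PySem.List.len_eq, Nat.add_comm]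
    simp only [hchars]
    by_cases hk : p.length ≤ 33
    · have hcond : ¬ PySem.List.len ((1 :: p).map Nat.digitChar) > 34 := by
        rw [hlen]; push_cast; omega
      rw [if_neg hcond, hchars]
      have htk : p.take 33 = p := List.take_of_length_le hk
      unfold pvIntOfDigits
      have h2 := pvParse_map 2 (1 :: p) (by
        intro b hb
        rcases List.mem_cons.1 hb with rfl | hb
        · right; rfl
        · exact hbits b hb) 0
      simp only [Nat.cast_zero, Nat.cast_ofNat] at h2
      rw [h2, htk]
      simp [List.foldl_cons]
    · have hcond : PySem.List.len ((1 :: p).map Nat.digitChar) > 34 := by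
        rw [hlen]; push_cast; omega
      rw [if_pos hcond]
      set q := 1 :: p.take 33 with hq
      have hbitsq : pvBits01 q := by
        intro b hb
        rcases List.mem_cons.1 hb with rfl | hb
        · right; rfl
        · exact pvBits01_take p 33 hbits b hb
      have hslice : PySem.List.slice ((1 :: p).map Nat.digitChar) none (some 34)
          = q.map Nat.digitChar := by
        rw [PySem.List.slice_to _ (by norm_num : (0:Int) ≤ 34), hq]
        simp [show ((34:Int).toNat) = 33 + 1 from rfl, List.take_succ_cons, List.map_take]
      rw [hslice]
      have hparse10 : pvIntOfDigits 10 (q.map Nat.digitChar) = ((pvDec q : Nat) : Int) := by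
        unfold pvIntOfDigits
        have h10 := pvParse_map 10 q hbitsq 0
        simp only [Nat.cast_zero, Nat.cast_ofNat] at h10
        exact h10
      rw [hparse10]
      have hcharsq : PySem.Int.toChars ((pvDec q : Nat) : Int) = q.map Nat.digitChar := by
        rw [pvToChars_natCast, hq, pvToDigits_dec (p.take 33) (pvBits01_take p 33 hbits)]
        simp [pvDigitChar_one]
      rw [hcharsq]
      unfold pvIntOfDigits
      have h2 := pvParse_map 2 q hbitsq 0
      simp only [Nat.cast_zero, Nat.cast_ofNat] at h2
      rw [h2, hq]
      simp [List.foldl_cons]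
  rw [hA0, hAres]
  -- B's side: slice = take, reverse loop = MSB-first fold, cast bridge.
  have hsliceB : PySem.List.slice ts none (some 33) = ts.take 33 := by
    rw [PySem.List.slice_to _ (by norm_num : (0:Int) ≤ 33)]
    rfl
  have hmaptake : p.take 33 = (ts.take 33).map pvBitN := by
    rw [hpt, List.map_take]
  have hcast := pvCastFoldT (ts.take 33) 1
  simp only [Nat.cast_one] at hcast
  have hrev := pvRevLoop (ts.take 33) 1
  rw [hmaptake, ← hcast, hrev, hsliceB]
  ring
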